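-- pv_equiv track=rewrite | github.com/uoRetr0/Enliven | character_chat.py | _select_representative_dialogues
-- ===== SOURCE A (Python) =====
-- def _select_representative_dialogues(dialogues: list[str], max_samples: int = 30) -> list[str]:
--     """Select representative dialogues from beginning, middle, and end."""
--     if len(dialogues) <= max_samples:
--         return dialogues
--     n = len(dialogues)
--     # Take from beginning, middle, and end for better coverage
--     indices = (
--         list(range(0, min(10, n))) +
--         list(range(n // 2 - 5, n // 2 + 5)) +
--         list(range(max(0, n - 10), n))
--     )
--     return [dialogues[i] for i in sorted(set(indices)) if i < n]
-- ===== SOURCE B (Python) =====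
-- def _select_representative_dialogues(dialogues: list[str], max_samples: int = 30) -> list[str]:
--     """Select representative dialogues from beginning, middle, and end."""
--     n = len(dialogues)
--     if n <= max_samples:
--         return dialogues
--     mid = n // 2
--     return [d for i, d in enumerate(dialogues)
--             if i < 10 or mid - 5 <= i < mid + 5 or i >= n - 10]
-- ===== Notes on version B (the rewrite author's own statement) =====
-- stated objective: simpler
-- what changed: Replaces the build-index-lists + sorted(set(...)) + filtered lookup pipeline with a single predicate-driven enumerate scan that keeps each element whose index falls in the beginning/middle/end windows, deduping and ordering for free.
-- intended difference: On lists with max_samples < len(dialogues) <= 9 A's middle window underflows into negative Python indices, so A returns extra wrapped-around copies of trailing elements prepended to the whole list (e.g. 7 items for a 4-element input), while B returns each dialogue exactly once in order, which is the intended sampling. — e.g. on _select_representative_dialogues(["a", "b", "c", "d"], 0): A returns ["b", "c", "d", "a", "b", "c", "d"], B returns ["a", "b", "c", "d"]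
import Mathlib
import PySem

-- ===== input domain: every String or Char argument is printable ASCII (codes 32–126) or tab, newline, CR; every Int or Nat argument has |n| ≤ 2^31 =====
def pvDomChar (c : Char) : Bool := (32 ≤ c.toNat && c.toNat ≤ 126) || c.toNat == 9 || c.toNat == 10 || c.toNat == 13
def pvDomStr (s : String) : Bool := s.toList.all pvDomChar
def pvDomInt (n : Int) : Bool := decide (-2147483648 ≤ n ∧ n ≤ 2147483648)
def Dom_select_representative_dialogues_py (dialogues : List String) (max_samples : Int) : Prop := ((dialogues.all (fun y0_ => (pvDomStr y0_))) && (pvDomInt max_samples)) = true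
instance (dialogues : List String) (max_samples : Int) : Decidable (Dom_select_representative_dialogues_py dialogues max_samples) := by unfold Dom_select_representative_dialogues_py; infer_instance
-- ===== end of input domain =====

-- B replaces A's index-list building + sorted(set(...)) + filtered lookups by one
-- predicate-driven enumerate scan (simpler); on the degenerate inputs max_samples < len ≤ 9
-- B avoids A's negative-index wraparound (see D_ below; Pre_ excludes the inputs where A raises).

-- ===== PORT A =====
def select_representative_dialogues_py (dialogues : List String) (max_samples : Int) : List String :=
  if (dialogues.length : Int) ≤ max_samples then dialogues
  else
    let n : Int := dialogues.length
    let indices : List Int :=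
      PySem.List.pyRange 0 (min 10 n) 1 ++
      (PySem.List.pyRange (PySem.Int.floordiv n 2 - 5) (PySem.Int.floordiv n 2 + 5) 1 ++
       PySem.List.pyRange (max 0 (n - 10)) n 1)
    ((PySem.List.sorted (PySem.Set.ofList indices) (fun i => i) false).filter
        (fun i => decide (i < n))).map
      (fun i => PySem.List.pyGetD dialogues i "")
      -- pyGetD is exact here: the IndexError inputs are excluded by Pre_

-- ===== PORT B =====
def select_representative_dialogues_py_alt (dialogues : List String) (max_samples : Int) : List String :=
  let n : Int := dialogues.length
  if n ≤ max_samples then dialogues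
  else
    let mid : Int := PySem.Int.floordiv n 2
    (PySem.List.enumerate dialogues 0).filterMap (fun p =>
      if p.1 < 10 ∨ (mid - 5 ≤ p.1 ∧ p.1 < mid + 5) ∨ n - 10 ≤ p.1 then some p.2 else none)

-- ===== PRECONDITION & SPEC =====
-- Pre_ excludes exactly the inputs where A raises IndexError (max_samples < len ≤ 3:
-- the middle window reaches an index below -len).
def Pre_select_representative_dialogues_py (dialogues : List String) (max_samples : Int) : Prop :=
  (dialogues.length : Int) ≤ max_samples ∨ 4 ≤ dialogues.length
instance (dialogues : List String) (max_samples : Int) : Decidable (Pre_select_representative_dialogues_py dialogues max_samples) := by unfold Pre_select_representative_dialogues_py; infer_instance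
def pvWitness_select_representative_dialogues_py : List String × Int := (["a", "b"], 5)

-- On lists with max_samples < len(dialogues) ≤ 9 A's middle window underflows into negative
-- Python indices, so A returns extra wrapped-around copies of trailing elements prepended to
-- the whole list, while B returns each dialogue exactly once in order — the intended sampling.
def D_select_representative_dialogues_py (dialogues : List String) (max_samples : Int) : Prop :=
  max_samples < (dialogues.length : Int) ∧ dialogues.length ≤ 9
instance (dialogues : List String) (max_samples : Int) : Decidable (D_select_representative_dialogues_py dialogues max_samples) := by unfold D_select_representative_dialogues_py; infer_instance

def Spec_select_representative_dialogues_py (dialogues : List String) (max_samples : Int) (out : List String) : Prop := ¬ D_select_representative_dialogues_py dialogues max_samples → out = select_representative_dialogues_py_alt dialogues max_samples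
instance (dialogues : List String) (max_samples : Int) (out : List String) : Decidable (Spec_select_representative_dialogues_py dialogues max_samples out) := by unfold Spec_select_representative_dialogues_py; infer_instance

def pvDiffWitness_select_representative_dialogues_py : List String × Int := (["a", "b", "c", "d"], 0)
def pvDiffWitnessOut_select_representative_dialogues_py : (List String) × (List String) :=
  (["b", "c", "d", "a", "b", "c", "d"], ["a", "b", "c", "d"])

-- ===== CLAIM (what is proved, stated in full; the proofs are below) =====
def Claim_unchanged_select_representative_dialogues_py : Prop := ∀ (dialogues : List String) (max_samples : Int), Dom_select_representative_dialogues_py dialogues max_samples → Pre_select_representative_dialogues_py dialogues max_samples → Spec_select_representative_dialogues_py dialogues max_samples (select_representative_dialogues_py dialogues max_samples)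
def Claim_changed_select_representative_dialogues_py : Prop := Dom_select_representative_dialogues_py (pvDiffWitness_select_representative_dialogues_py.1) (pvDiffWitness_select_representative_dialogues_py.2) ∧ Pre_select_representative_dialogues_py (pvDiffWitness_select_representative_dialogues_py.1) (pvDiffWitness_select_representative_dialogues_py.2) ∧ D_select_representative_dialogues_py (pvDiffWitness_select_representative_dialogues_py.1) (pvDiffWitness_select_representative_dialogues_py.2) ∧ select_representative_dialogues_py (pvDiffWitness_select_representative_dialogues_py.1) (pvDiffWitness_select_representative_dialogues_py.2) = pvDiffWitnessOut_select_representative_dialogues_py.1 ∧ select_representative_dialogues_py_alt (pvDiffWitness_select_representative_dialogues_py.1) (pvDiffWitness_select_representative_dialogues_py.2) = pvDiffWitnessOut_select_representative_dialogues_py.2 ∧ pvDiffWitnessOut_select_representative_dialogues_py.1 ≠ pvDiffWitnessOut_select_representative_dialogues_py.2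
def Claim_exact_select_representative_dialogues_py : Prop := ∀ (dialogues : List String) (max_samples : Int), Dom_select_representative_dialogues_py dialogues max_samples → Pre_select_representative_dialogues_py dialogues max_samples → D_select_representative_dialogues_py dialogues max_samples → select_representative_dialogues_py dialogues max_samples ≠ select_representative_dialogues_py_alt dialogues max_samples

-- ===== LEMMAS AND PROOFS =====

-- B as a filter-then-map over the index range
theorem filterMap_if_eq_map_filter {α β : Type} (c : α → Prop) [DecidablePred c] (g : α → β)
    (l : List α) :
    l.filterMap (fun j => if c j then some (g j) else none) =
      (l.filter (fun j => decide (c j))).map g := by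
  induction l with
  | nil => rfl
  | cons x xs ih =>
    by_cases h : c x <;> simp [h, ih]

theorem alt_eq_map (dialogues : List String) (max_samples : Int)
    (h : ¬ (dialogues.length : Int) ≤ max_samples) :
    select_representative_dialogues_py_alt dialogues max_samples =
      ((PySem.List.pyRange 0 (dialogues.length : Int) 1).filter
          (fun j => decide (j < 10 ∨ ((dialogues.length : Int) / 2 - 5 ≤ j ∧ j < (dialogues.length : Int) / 2 + 5) ∨ (dialogues.length : Int) - 10 ≤ j))).map
        (fun j => PySem.List.pyGetD dialogues j "") := by
  unfold select_representative_dialogues_py_alt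
  simp only [if_neg h]
  rw [PySem.List.enumerate_eq_map_pyRange (d := ""), List.filterMap_map]
  rw [show PySem.Int.floordiv (dialogues.length : Int) 2 = (dialogues.length : Int) / 2 by
        exact PySem.Int.floordiv_eq_ediv_of_pos (by norm_num)]
  exact filterMap_if_eq_map_filter _ _ _

-- A's sorted-set index list, characterised as a filtered range (the n ≥ 10 case)
theorem sorted_set_eq_filter (dialogues : List String) (hn : 10 ≤ dialogues.length) :
    PySem.List.sorted (PySem.Set.ofList
      (PySem.List.pyRange 0 (min 10 (dialogues.length : Int)) 1 ++
       (PySem.List.pyRange (PySem.Int.floordiv (dialogues.length : Int) 2 - 5) (PySem.Int.floordiv (dialogues.length : Int) 2 + 5) 1 ++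
        PySem.List.pyRange (max 0 ((dialogues.length : Int) - 10)) (dialogues.length : Int) 1))) (fun i => i) false =
      (PySem.List.pyRange 0 (dialogues.length : Int) 1).filter
        (fun j => decide (j < 10 ∨ ((dialogues.length : Int) / 2 - 5 ≤ j ∧ j < (dialogues.length : Int) / 2 + 5) ∨ (dialogues.length : Int) - 10 ≤ j)) := by
  apply PySem.List.sorted_eq_of_perm_of_pairwise_lt
  · rw [List.perm_ext_iff_of_nodup]
    · intro x
      simp only [List.mem_filter, PySem.Set.mem_ofList, List.mem_append,
        PySem.List.mem_pyRange_one, decide_eq_true_eq,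
        show PySem.Int.floordiv (dialogues.length : Int) 2 = (dialogues.length : Int) / 2 by
          exact PySem.Int.floordiv_eq_ediv_of_pos (by norm_num)]
      have h10 : (10 : Int) ≤ (dialogues.length : Int) := by exact_mod_cast hn
      omega
    · exact List.Pairwise.imp ne_of_lt
        ((PySem.List.pairwise_lt_pyRange_one 0 (dialogues.length : Int)).filter _)
    · exact PySem.Set.nodup_ofList _
  · exact ((PySem.List.pairwise_lt_pyRange_one 0 (dialogues.length : Int)).filter _)

-- same characterisation in the degenerate 4 ≤ n ≤ 9 case: one contiguous range
theorem sorted_set_eq_range_small (dialogues : List String)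
    (h4 : 4 ≤ dialogues.length) (h9 : dialogues.length ≤ 9) :
    PySem.List.sorted (PySem.Set.ofList
      (PySem.List.pyRange 0 (min 10 (dialogues.length : Int)) 1 ++
       (PySem.List.pyRange (PySem.Int.floordiv (dialogues.length : Int) 2 - 5) (PySem.Int.floordiv (dialogues.length : Int) 2 + 5) 1 ++
        PySem.List.pyRange (max 0 ((dialogues.length : Int) - 10)) (dialogues.length : Int) 1))) (fun i => i) false =
      PySem.List.pyRange ((dialogues.length : Int) / 2 - 5)
        (max ((dialogues.length : Int) / 2 + 5) (dialogues.length : Int)) 1 := by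
  apply PySem.List.sorted_eq_of_perm_of_pairwise_lt
  · rw [List.perm_ext_iff_of_nodup]
    · intro x
      simp only [PySem.Set.mem_ofList, List.mem_append, PySem.List.mem_pyRange_one,
        show PySem.Int.floordiv (dialogues.length : Int) 2 = (dialogues.length : Int) / 2 by
          exact PySem.Int.floordiv_eq_ediv_of_pos (by norm_num)]
      have h4' : (4 : Int) ≤ (dialogues.length : Int) := by exact_mod_cast h4
      have h9' : (dialogues.length : Int) ≤ 9 := by exact_mod_cast h9
      omega
    · exact List.Pairwise.imp ne_of_lt (PySem.List.pairwise_lt_pyRange_one _ _)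
    · exact PySem.Set.nodup_ofList _
  · exact PySem.List.pairwise_lt_pyRange_one _ _

theorem select_representative_dialogues_py_spec : Claim_unchanged_select_representative_dialogues_py := by
  intro dialogues max_samples _hDom hPre hD
  unfold select_representative_dialogues_py
  by_cases hle : (dialogues.length : Int) ≤ max_samples
  · simp only [if_pos hle]
    unfold select_representative_dialogues_py_alt
    simp only [if_pos hle]
  · -- here ¬ D_ and Pre_ force 10 ≤ length
    have hn : 10 ≤ dialogues.length := by
      unfold D_select_representative_dialogues_py at hD
      rcases hPre with h | h
      · exact absurd h hle
      · simp only [not_and, not_le] at hD hle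
        omega
    simp only [if_neg hle]
    rw [alt_eq_map dialogues max_samples hle, sorted_set_eq_filter dialogues hn]
    congr 1
    rw [List.filter_filter]
    apply List.filter_congr
    intro x hx
    have hxm := (PySem.List.mem_pyRange_one).1 hx
    rw [decide_eq_true hxm.2, Bool.true_and]

theorem select_representative_dialogues_py_changed : Claim_changed_select_representative_dialogues_py := by
  unfold Claim_changed_select_representative_dialogues_py; decide

theorem select_representative_dialogues_py_tight : Claim_exact_select_representative_dialogues_py := by
  intro dialogues max_samples _hDom hPre hD heq
  unfold D_select_representative_dialogues_py at hD
  obtain ⟨hlt, h9⟩ := hD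
  have h4 : 4 ≤ dialogues.length := by
    rcases hPre with h | h
    · omega
    · exact h
  have h4' : (4 : Int) ≤ (dialogues.length : Int) := by exact_mod_cast h4
  have h9' : (dialogues.length : Int) ≤ 9 := by exact_mod_cast h9
  have hle : ¬ (dialogues.length : Int) ≤ max_samples := by omega
  -- compute both lengths and contradict
  have hA : (select_representative_dialogues_py dialogues max_samples).length =
      ((dialogues.length : Int) - ((dialogues.length : Int) / 2 - 5)).toNat := by
    unfold select_representative_dialogues_py
    simp only [if_neg hle]
    rw [sorted_set_eq_range_small dialogues h4 h9]
    rw [PySem.List.pyRange_one_append ((dialogues.length : Int) / 2 - 5) (dialogues.length : Int)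
          (max ((dialogues.length : Int) / 2 + 5) (dialogues.length : Int)) (by omega) (by omega),
        List.filter_append]
    rw [List.filter_eq_self.2 (by
          intro x hx
          have := (PySem.List.mem_pyRange_one).1 hx
          simpa using this.2),
        List.filter_eq_nil_iff.2 (by
          intro x hx
          have := (PySem.List.mem_pyRange_one).1 hx
          simp
          omega)]
    simp [PySem.List.length_pyRange_one]
  have hB : (select_representative_dialogues_py_alt dialogues max_samples).length =
      dialogues.length := by
    rw [alt_eq_map dialogues max_samples hle]
    rw [List.filter_eq_self.2 (by
          intro x hx
          have := (PySem.List.mem_pyRange_one).1 hx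
          simp only [decide_eq_true_eq]
          omega)]
    simp [PySem.List.length_pyRange_one]
  rw [heq, hB] at hA
  omega
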